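-- pv_equiv track=rewrite | github.com/bhuztez/fml | fml/compile/asm.py | iter_line_incr
-- ===== SOURCE A (Python) =====
-- def iter_line_incr(line_incr):
--     if line_incr > 0:
--         while line_incr > 127:
--             line_incr -= 127
--             yield 127
--         yield line_incr
--     else:
--         while line_incr < -128:
--             line_incr += 128
--             yield 128
--         yield 256 + line_incr
-- ===== SOURCE B (Python) =====
-- def iter_line_incr(line_incr):
--     if line_incr > 0:
--         n = (line_incr - 1) // 127
--         for _ in range(n):
--             yield 127
--         yield line_incr - 127 * n
--     else:
--         m = max(0, -((line_incr + 128) // 128))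
--         for _ in range(m):
--             yield 128
--         yield 256 + line_incr + 128 * m
-- ===== Notes on version B (the rewrite author's own statement) =====
-- stated objective: simpler
-- what changed: Replaces A's repeated-subtraction while loops with a closed-form chunk count obtained by one floor division per branch, then emits that many full-size chunks followed by the remainder.
import Mathlib
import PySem

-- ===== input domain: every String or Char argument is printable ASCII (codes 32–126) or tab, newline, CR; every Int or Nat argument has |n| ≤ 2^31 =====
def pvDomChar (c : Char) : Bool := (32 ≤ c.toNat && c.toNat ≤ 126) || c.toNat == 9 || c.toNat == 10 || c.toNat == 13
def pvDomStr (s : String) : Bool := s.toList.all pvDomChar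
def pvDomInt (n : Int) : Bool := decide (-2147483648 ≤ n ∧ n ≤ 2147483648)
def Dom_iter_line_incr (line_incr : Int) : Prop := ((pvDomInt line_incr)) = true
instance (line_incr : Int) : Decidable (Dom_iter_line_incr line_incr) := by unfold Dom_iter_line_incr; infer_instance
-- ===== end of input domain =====

-- B replaces A's repeated-subtraction loops by a closed-form chunk count from one
-- floor division, then emits the chunks (objective: simpler; generator = list of yields).

-- ===== PORT A =====
-- while line_incr > 127: line_incr -= 127; yield 127  … then yield line_incr
def iterPosA (x : Int) : List Int :=
  if x > 127 then 127 :: iterPosA (x - 127) else [x]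
termination_by x.toNat
decreasing_by omega

-- while line_incr < -128: line_incr += 128; yield 128 … then yield 256 + line_incr
def iterNegA (x : Int) : List Int :=
  if x < -128 then 128 :: iterNegA (x + 128) else [256 + x]
termination_by (-x).toNat
decreasing_by omega

def iter_line_incr (line_incr : Int) : List Int :=
  if line_incr > 0 then iterPosA line_incr else iterNegA line_incr

-- ===== PORT B =====
def iter_line_incr_alt (line_incr : Int) : List Int :=
  if line_incr > 0 then
    let n := PySem.Int.floordiv (line_incr - 1) 127
    List.replicate n.toNat 127 ++ [line_incr - 127 * n]
  else
    let m := max 0 (-(PySem.Int.floordiv (line_incr + 128) 128))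
    List.replicate m.toNat 128 ++ [256 + line_incr + 128 * m]

-- ===== PRECONDITION & SPEC =====
def Spec_iter_line_incr (line_incr : Int) (out : List Int) : Prop := out = iter_line_incr_alt line_incr
instance (line_incr : Int) (out : List Int) : Decidable (Spec_iter_line_incr line_incr out) := by unfold Spec_iter_line_incr; infer_instance

-- ===== CLAIM (what is proved, stated in full; the proofs are below) =====
def Claim_equal_iter_line_incr : Prop := ∀ (line_incr : Int), Dom_iter_line_incr line_incr → Spec_iter_line_incr line_incr (iter_line_incr line_incr)

-- ===== LEMMAS AND PROOFS =====

lemma iterPosA_closed (x : Int) (hx : 0 < x) :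
    iterPosA x =
      List.replicate (PySem.Int.floordiv (x - 1) 127).toNat 127
        ++ [x - 127 * PySem.Int.floordiv (x - 1) 127] := by
  rw [iterPosA]
  rw [PySem.Int.floordiv_eq_ediv_of_pos (a := x - 1) (by norm_num)]
  split_ifs with h
  · have ih := iterPosA_closed (x - 127) (by omega)
    rw [PySem.Int.floordiv_eq_ediv_of_pos (a := x - 127 - 1) (by norm_num)] at ih
    have hq : (x - 1) / 127 = (x - 127 - 1) / 127 + 1 := by omega
    have hnn : 0 ≤ (x - 127 - 1) / 127 := by omega
    rw [ih, hq]
    have ht : ((x - 127 - 1) / 127 + 1).toNat = ((x - 127 - 1) / 127).toNat + 1 := by omega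
    rw [ht, List.replicate_succ, List.cons_append]
    congr 2
    simp only [List.cons.injEq, and_true]
    omega
  · have hz : (x - 1) / 127 = 0 := by omega
    rw [hz]
    simp
termination_by x.toNat
decreasing_by omega

lemma iterNegA_closed (x : Int) (hx : x ≤ 0) :
    iterNegA x =
      List.replicate (max 0 (-(PySem.Int.floordiv (x + 128) 128))).toNat 128
        ++ [256 + x + 128 * max 0 (-(PySem.Int.floordiv (x + 128) 128))] := by
  rw [iterNegA]
  rw [PySem.Int.floordiv_eq_ediv_of_pos (a := x + 128) (by norm_num)]
  split_ifs with h
  · have ih := iterNegA_closed (x + 128) (by omega)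
    rw [PySem.Int.floordiv_eq_ediv_of_pos (a := x + 128 + 128) (by norm_num)] at ih
    have hle : (x + 128 + 128) / 128 ≤ 0 := by omega
    have hmax' : max 0 (-((x + 128 + 128) / 128)) = -((x + 128 + 128) / 128) := by omega
    have hmax : max 0 (-((x + 128) / 128)) = -((x + 128) / 128) := by omega
    have hq : -((x + 128) / 128) = -((x + 128 + 128) / 128) + 1 := by omega
    have hnn : 0 ≤ -((x + 128 + 128) / 128) := by omega
    rw [ih, hmax, hmax', hq]
    have ht : (-((x + 128 + 128) / 128) + 1).toNat = (-((x + 128 + 128) / 128)).toNat + 1 := by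
      omega
    rw [ht, List.replicate_succ, List.cons_append]
    congr 2
    simp only [List.cons.injEq, and_true]
    omega
  · have hz : max 0 (-((x + 128) / 128)) = 0 := by omega
    rw [hz]
    simp
termination_by (-x).toNat
decreasing_by omega

-- ===== VERDICT (by name: the statement is the Claim_ definition above) =====
theorem iter_line_incr_spec : Claim_equal_iter_line_incr := by
  intro line_incr _
  unfold Spec_iter_line_incr iter_line_incr iter_line_incr_alt
  split_ifs with h
  · exact iterPosA_closed line_incr h
  · exact iterNegA_closed line_incr (by omega)
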